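-- pv_equiv track=rewrite | github.com/Al-Adnane/QuranFrontier | frontier_neuro_symbolic/three_world/symbolic_layer.py | check_rule_consistency
-- ===== SOURCE A (Python) =====
-- from typing import Dict, List, Tuple, Optional, Any, Set
--
-- def check_rule_consistency(rule_set: Set[str]) -> bool:
--     """Check if a set of jurisprudential rules is internally consistent.
--
--     Args:
--         rule_set: Set of rule identifiers
--
--     Returns:
--         True if rules are consistent
--     """
--     # Check for explicit contradictions
--     for rule1 in rule_set:
--         for rule2 in rule_set:
--             if rule1 != rule2:
--                 # Check for contradictory rules
--                 if any(
--                     neg in rule2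
--                     for neg in ["not_" + base for base in rule_set
--                                if base in rule1]
--                 ):
--                     return False
--     return True
-- ===== SOURCE B (Python) =====
-- def check_rule_consistency(rule_set):
--     """Check if a set of jurisprudential rules is internally consistent.
--
--     Per base rule, one pass over the (deduplicated) rules: the set is
--     inconsistent iff some rule contains "not_" + base while at least two
--     distinct rules contain base (a rule containing "not_" + base contains
--     base too, so that guarantees a distinct contradicting pair).
--     """
--     rules = list(dict.fromkeys(rule_set))
--     for base in rules:
--         neg = "not_" + base
--         if any(neg in r for r in rules) and sum(base in r for r in rules) >= 2:
--             return False
--     return True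
-- ===== Notes on version B (the rewrite author's own statement) =====
-- stated objective: faster
-- what changed: Instead of scanning every ordered pair (rule1, rule2) and, inside that, every base of the set, B loops once over the deduplicated bases and decides contradiction per base from one pass (some rule contains 'not_'+base and at least two distinct rules contain base), dropping one full nesting level.
import Mathlib
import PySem

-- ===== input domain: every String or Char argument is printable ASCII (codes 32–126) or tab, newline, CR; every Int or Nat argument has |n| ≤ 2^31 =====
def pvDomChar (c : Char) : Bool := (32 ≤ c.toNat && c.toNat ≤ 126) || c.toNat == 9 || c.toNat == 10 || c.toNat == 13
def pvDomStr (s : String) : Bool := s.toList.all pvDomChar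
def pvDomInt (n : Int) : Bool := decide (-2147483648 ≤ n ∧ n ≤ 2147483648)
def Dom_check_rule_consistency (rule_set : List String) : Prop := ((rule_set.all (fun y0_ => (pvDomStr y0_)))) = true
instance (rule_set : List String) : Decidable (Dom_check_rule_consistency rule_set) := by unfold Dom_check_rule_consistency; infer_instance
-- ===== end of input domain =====

-- B replaces A's triple scan (every ordered pair of rules × every base) by one loop over the
-- deduplicated bases with a per-base pass; measurably faster (asymptotic: one nesting level removed).

-- ===== PORT A =====
-- nested for-loops with early `return False`; the inner Python `any` over the
-- comprehension ["not_" + base for base in rule_set if base in rule1]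
def check_rule_consistency (rule_set : List String) : Bool :=
  !(rule_set.any (fun rule1 =>
      rule_set.any (fun rule2 =>
        (rule1 != rule2) &&
          ((rule_set.filter (fun base => PySem.Str.isIn base rule1)).map
              (fun base => "not_" ++ base)).any
            (fun neg => PySem.Str.isIn neg rule2))))

-- ===== PORT B =====
-- rules = list(dict.fromkeys(rule_set)); per base: any rule contains "not_"+base
-- and at least two (distinct, thanks to dedup) rules contain base
def check_rule_consistency_alt (rule_set : List String) : Bool :=
  let rules := PySem.List.dedup rule_set
  !(rules.any (fun base =>
      rules.any (fun r => PySem.Str.isIn ("not_" ++ base) r) &&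
      decide (2 ≤ rules.countP (fun r => PySem.Str.isIn base r))))

-- ===== PRECONDITION & SPEC =====
def Spec_check_rule_consistency (rule_set : List String) (out : Bool) : Prop := out = check_rule_consistency_alt rule_set
instance (rule_set : List String) (out : Bool) : Decidable (Spec_check_rule_consistency rule_set out) := by unfold Spec_check_rule_consistency; infer_instance

-- ===== CLAIM (what is proved, stated in full; the proofs are below) =====
def Claim_equal_check_rule_consistency : Prop := ∀ (rule_set : List String), Dom_check_rule_consistency rule_set → Spec_check_rule_consistency rule_set (check_rule_consistency rule_set)

-- ===== LEMMAS AND PROOFS =====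

-- a rule containing "not_" ++ b contains b
theorem infix_of_infix_not (b r : String)
    (h : ("not_" ++ b).toList <:+: r.toList) : b.toList <:+: r.toList := by
  refine List.IsInfix.trans ?_ h
  rw [String.toList_append]
  exact (List.suffix_append _ _).isInfix

-- two distinct members satisfying p give countP ≥ 2
theorem two_le_countP {α : Type} {S : List α} {p : α → Bool} {x y : α}
    (hx : x ∈ S) (hy : y ∈ S) (hne : x ≠ y)
    (hpx : p x = true) (hpy : p y = true) : 2 ≤ S.countP p := by
  rw [List.countP_eq_length_filter]
  have hx' : x ∈ S.filter p := List.mem_filter.mpr ⟨hx, hpx⟩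
  have hy' : y ∈ S.filter p := List.mem_filter.mpr ⟨hy, hpy⟩
  match hf : S.filter p with
  | [] => rw [hf] at hx'; simp at hx'
  | [a] =>
      rw [hf] at hx' hy'
      simp only [List.mem_singleton] at hx' hy'
      exact absurd (hx'.trans hy'.symm) hne
  | a :: b :: t => simp [List.length_cons]

-- countP ≥ 2 on a Nodup list gives two distinct members satisfying p
theorem exists_two_of_countP {α : Type} {S : List α} {p : α → Bool}
    (hnd : S.Nodup) (h : 2 ≤ S.countP p) :
    ∃ x ∈ S, ∃ y ∈ S, p x = true ∧ p y = true ∧ x ≠ y := by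
  rw [List.countP_eq_length_filter] at h
  have hndf : (S.filter p).Nodup := hnd.filter p
  match hf : S.filter p with
  | [] => rw [hf] at h; simp at h
  | [a] => rw [hf] at h; simp at h
  | a :: b :: t =>
      rw [hf] at hndf
      have ha : a ∈ S.filter p := by rw [hf]; simp
      have hb : b ∈ S.filter p := by rw [hf]; simp
      have hane : a ≠ b := by
        intro hab
        exact (List.nodup_cons.mp hndf).1 (by simp [hab])
      exact ⟨a, (List.mem_filter.mp ha).1, b, (List.mem_filter.mp hb).1,
        (List.mem_filter.mp ha).2, (List.mem_filter.mp hb).2, hane⟩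

theorem check_rule_consistency_eq (rule_set : List String) :
    check_rule_consistency rule_set = check_rule_consistency_alt rule_set := by
  unfold check_rule_consistency check_rule_consistency_alt
  apply congrArg
  apply Bool.eq_iff_iff.mpr
  simp only [List.any_eq_true, List.mem_map, List.mem_filter, Bool.and_eq_true,
    bne_iff_ne, ne_eq, decide_eq_true_eq, PySem.Str.isIn_iff_infix,
    PySem.List.mem_dedup]
  constructor
  · rintro ⟨r1, hr1, r2, hr2, hne, neg, ⟨b, ⟨hb, hbr1⟩, rfl⟩, hnr2⟩
    refine ⟨b, hb, ⟨r2, hr2, hnr2⟩, ?_⟩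
    exact two_le_countP ((PySem.List.mem_dedup _ _).mpr hr1) ((PySem.List.mem_dedup _ _).mpr hr2) hne
      (by rw [PySem.Str.isIn_iff_infix]; exact hbr1)
      (by rw [PySem.Str.isIn_iff_infix]; exact infix_of_infix_not b r2 hnr2)
  · rintro ⟨b, hb, ⟨r, hr, hnr⟩, hcnt⟩
    obtain ⟨x, hx, y, hy, hpx, hpy, hxy⟩ :=
      exists_two_of_countP (PySem.List.nodup_dedup rule_set) hcnt
    simp only [PySem.Str.isIn_iff_infix] at hpx hpy
    by_cases hxr : x = r
    · exact ⟨y, (PySem.List.mem_dedup _ _).mp hy, r, hr, fun h => hxy (hxr.trans h.symm), "not_" ++ b,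
        ⟨b, ⟨hb, hpy⟩, rfl⟩, hnr⟩
    · exact ⟨x, (PySem.List.mem_dedup _ _).mp hx, r, hr, hxr, "not_" ++ b,
        ⟨b, ⟨hb, hpx⟩, rfl⟩, hnr⟩

-- ===== VERDICT (by name: the statement is the Claim_ definition above) =====
theorem check_rule_consistency_spec : Claim_equal_check_rule_consistency := by
  intro rule_set _
  exact check_rule_consistency_eq rule_set
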